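-- pv_equiv track=rewrite | github.com/SrivathsanRaju/billcheck | backend/app/services/csv_fast_extractor.py | _find_csv_start
-- ===== SOURCE A (Python) =====
-- from typing import List, Optional
--
-- def _find_csv_start(lines: List[str], keyword_set: set) -> int:
--     """
--     Return the index of the first line that:
--       - has >= 4 commas (likely a CSV row), AND
--       - contains at least one keyword from keyword_set (confirms it is a header row).
--     Falls back to the first line with >= 4 commas if no keyword match is found.
--     """
--     fallback = None
--     for i, line in enumerate(lines):
--         if line.count(",") >= 4:
--             if fallback is None:
--                 fallback = i
--             if any(kw in line.lower() for kw in keyword_set):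
--                 return i
--     return fallback or 0
-- ===== SOURCE B (Python) =====
-- def _find_csv_start(lines, keyword_set):
--     match = next((i for i, line in enumerate(lines)
--                   if line.count(",") >= 4
--                   and any(kw in line.lower() for kw in keyword_set)), None)
--     if match is not None:
--         return match
--     fallback = next((i for i, line in enumerate(lines) if line.count(",") >= 4), None)
--     return fallback if fallback is not None else 0
-- ===== Notes on version B (the rewrite author's own statement) =====
-- stated objective: simpler
-- what changed: Replaces the single loop with an interleaved fallback accumulator by two independent first-match searches (header match first, plain comma-line fallback second), each a flat generator expression.
import Mathlib
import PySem

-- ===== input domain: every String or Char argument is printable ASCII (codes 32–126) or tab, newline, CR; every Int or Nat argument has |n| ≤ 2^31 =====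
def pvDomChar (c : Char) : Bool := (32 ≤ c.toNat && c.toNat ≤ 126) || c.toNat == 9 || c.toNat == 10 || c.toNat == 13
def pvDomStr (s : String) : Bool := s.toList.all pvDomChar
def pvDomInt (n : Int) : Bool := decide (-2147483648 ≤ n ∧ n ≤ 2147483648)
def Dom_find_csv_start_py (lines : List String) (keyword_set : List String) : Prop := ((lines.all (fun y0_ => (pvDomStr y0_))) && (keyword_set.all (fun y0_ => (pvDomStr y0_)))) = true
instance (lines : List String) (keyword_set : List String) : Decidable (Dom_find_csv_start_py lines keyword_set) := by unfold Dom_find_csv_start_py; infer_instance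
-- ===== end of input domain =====

-- B replaces A's single loop with a fallback accumulator by two independent first-match searches (simpler decomposition).

-- ===== PORT A =====
-- A's loop: enumerate with the running index and the Option fallback as state.
def findCsvLoopA (kws : List String) : List String → Int → Option Int → Int
  | [], _, fb => fb.getD 0          -- 'return fallback or 0' (fallback ≥ 0, so 'or' = getD 0)
  | l :: rest, i, fb =>
    if 4 ≤ PySem.Str.count l "," then
      let fb' := if fb.isNone then some i else fb
      if kws.any (fun kw => PySem.Str.isIn kw (PySem.Str.lower l)) then i
      else findCsvLoopA kws rest (i + 1) fb'
    else findCsvLoopA kws rest (i + 1) fb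

def find_csv_start_py (lines : List String) (keyword_set : List String) : Int :=
  findCsvLoopA keyword_set lines 0 none

-- ===== PORT B =====
-- next((i for i, line in enumerate(lines) if p(line)), None)
def pyFirstIdx (p : String → Bool) (lines : List String) : Option Int :=
  ((PySem.List.enumerate lines).find? (fun pr => p pr.2)).map (fun pr => pr.1)

def find_csv_start_py_alt (lines : List String) (keyword_set : List String) : Int :=
  let isCSV := fun (l : String) => decide (4 ≤ PySem.Str.count l ",")
  let hasKw := fun (l : String) => keyword_set.any (fun kw => PySem.Str.isIn kw (PySem.Str.lower l))
  match pyFirstIdx (fun l => isCSV l && hasKw l) lines with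
  | some i => i
  | none => (pyFirstIdx isCSV lines).getD 0

-- ===== PRECONDITION & SPEC =====
def Spec_find_csv_start_py (lines : List String) (keyword_set : List String) (out : Int) : Prop := out = find_csv_start_py_alt lines keyword_set
instance (lines : List String) (keyword_set : List String) (out : Int) : Decidable (Spec_find_csv_start_py lines keyword_set out) := by unfold Spec_find_csv_start_py; infer_instance

-- ===== CLAIM (what is proved, stated in full; the proofs are below) =====
def Claim_equal_find_csv_start_py : Prop := ∀ (lines : List String) (keyword_set : List String), Dom_find_csv_start_py lines keyword_set → Spec_find_csv_start_py lines keyword_set (find_csv_start_py lines keyword_set)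

-- ===== LEMMAS AND PROOFS =====

-- A's loop, with arbitrary start index s and fallback state fb, in terms of B's two searches on the suffix.
theorem findCsvLoopA_eq (kws : List String) (lines : List String) : ∀ (s : Int) (fb : Option Int),
    findCsvLoopA kws lines s fb =
      match ((PySem.List.enumerate lines s).find?
          (fun pr => decide (4 ≤ PySem.Str.count pr.2 ",") &&
            kws.any (fun kw => PySem.Str.isIn kw (PySem.Str.lower pr.2)))).map (fun pr => pr.1) with
      | some i => i
      | none =>
        match fb with
        | some f => f
        | none => (((PySem.List.enumerate lines s).find?
            (fun pr => decide (4 ≤ PySem.Str.count pr.2 ","))).map (fun pr => pr.1)).getD 0 := by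
  induction lines with
  | nil => intro s fb; cases fb <;> simp [findCsvLoopA, PySem.List.enumerate_nil]
  | cons l rest ih =>
    intro s fb
    simp only [findCsvLoopA, PySem.List.enumerate_cons, List.find?]
    cases hc : decide (4 ≤ PySem.Str.count l ",") with
    | false =>
      rw [if_neg (decide_eq_false_iff_not.mp hc)]
      rw [ih (s + 1)]
      simp only [Bool.false_and]
    | true =>
      rw [if_pos (decide_eq_true_eq.mp (by exact hc))]
      cases hk : kws.any (fun kw => PySem.Str.isIn kw (PySem.Str.lower l)) with
      | true => simp
      | false =>
        rw [ih (s + 1)]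
        cases fb <;> simp

-- ===== VERDICT (by name: the statement is the Claim_ definition above) =====
theorem find_csv_start_py_spec : Claim_equal_find_csv_start_py := by
  intro lines kws _
  show find_csv_start_py lines kws = find_csv_start_py_alt lines kws
  simp only [find_csv_start_py, find_csv_start_py_alt, pyFirstIdx, findCsvLoopA_eq]
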